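-- pv_equiv track=rewrite | github.com/itzabhi2103/100-days-unstop- | Poster pointer.py | can_print
-- ===== SOURCE A (Python) =====
-- def can_print(n, s):
--   segment = ""
--   for ch in s:
--     if ch=='W':
--       if segment:
--         if len(segment)==1 or len(set(segment))==1:
--           return "NO"
--       segment = ""
--     else:
--       segment+=ch
--   if segment:
--     if len(segment)==1 or len(set(segment))==1:
--       return 'NO'
--   return 'YES'
-- ===== SOURCE B (Python) =====
-- def can_print(n, s):
--     for seg in s.split('W'):
--         if seg and len(set(seg)) == 1:
--             return "NO"
--     return "YES"
-- ===== Notes on version B (the rewrite author's own statement) =====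
-- stated objective: idiomatic
-- what changed: Replaces the interleaved single-pass scan with a running segment accumulator by a build-then-scan decomposition: split on 'W' first, then reject any non-empty uniform segment.
import Mathlib
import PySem

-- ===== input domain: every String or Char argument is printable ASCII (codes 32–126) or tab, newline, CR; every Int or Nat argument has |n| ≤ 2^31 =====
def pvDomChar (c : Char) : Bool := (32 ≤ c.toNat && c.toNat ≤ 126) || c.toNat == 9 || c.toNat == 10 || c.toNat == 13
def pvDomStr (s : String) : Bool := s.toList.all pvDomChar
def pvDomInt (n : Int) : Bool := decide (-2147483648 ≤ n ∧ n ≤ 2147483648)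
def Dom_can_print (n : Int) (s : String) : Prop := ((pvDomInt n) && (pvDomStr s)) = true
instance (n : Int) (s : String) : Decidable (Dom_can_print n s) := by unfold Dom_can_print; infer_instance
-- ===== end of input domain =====

-- B replaces A's interleaved scan-with-accumulator by a build-then-scan decomposition:
-- split the string on 'W' first, then reject any non-empty all-identical segment (idiomatic).


-- ===== PORT A =====
-- A's loop: for ch in s, accumulating 'segment'; early return "NO" on a bad segment.
def canPrintGo : List Char → List Char → String
  | [], segment =>
      if segment ≠ [] then
        if segment.length == 1 || (PySem.Set.ofList segment).length == 1 then "NO" else "YES"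
      else "YES"
  | c :: rest, segment =>
      if c = 'W' then
        if segment ≠ [] ∧ (segment.length == 1 || (PySem.Set.ofList segment).length == 1) then "NO"
        else canPrintGo rest []
      else canPrintGo rest (segment ++ [c])

def can_print (n : Int) (s : String) : String := canPrintGo s.toList []

-- ===== PORT B =====
-- hand port of Python str.split with the single-character separator 'W' (exact: keeps empty pieces)
def splitW : List Char → List Char → List (List Char)
  | [], cur => [cur.reverse]
  | c :: rest, cur => if c = 'W' then cur.reverse :: splitW rest [] else splitW rest (c :: cur)

def can_print_alt (n : Int) (s : String) : String :=
  if (splitW s.toList []).any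
      (fun seg => decide (seg ≠ []) && ((PySem.Set.ofList seg).length == 1))
  then "NO" else "YES"

-- ===== PRECONDITION & SPEC =====
def Spec_can_print (n : Int) (s : String) (out : String) : Prop := out = can_print_alt n s
instance (n : Int) (s : String) (out : String) : Decidable (Spec_can_print n s out) := by unfold Spec_can_print; infer_instance

-- ===== CLAIM (what is proved, stated in full; the proofs are below) =====
def Claim_equal_can_print : Prop := ∀ (n : Int) (s : String), Dom_can_print n s → Spec_can_print n s (can_print n s)

-- ===== LEMMAS AND PROOFS =====
-- On a non-empty segment, A's "len==1 or len(set)==1" condition equals B's "len(set)==1".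
theorem bad_cond_eq (seg : List Char) :
    (decide (seg ≠ []) && (seg.length == 1 || (PySem.Set.ofList seg).length == 1))
      = (decide (seg ≠ []) && ((PySem.Set.ofList seg).length == 1)) := by
  match seg with
  | [] => simp
  | [c] => simp [PySem.Set.ofList, PySem.Set.add, PySem.Set.empty]
  | c :: d :: t => simp

theorem go_eq (l : List Char) : ∀ seg : List Char,
    canPrintGo l seg =
      if (splitW l seg.reverse).any
          (fun seg => decide (seg ≠ []) && ((PySem.Set.ofList seg).length == 1))
      then "NO" else "YES" := by
  induction l with
  | nil =>
      intro seg
      simp only [canPrintGo, splitW, List.reverse_reverse, List.any_cons, List.any_nil,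
        Bool.or_false]
      by_cases hs : seg = []
      · subst hs; rfl
      · have hdt : decide (seg ≠ []) = true := by simp [hs]
        have h2 : (seg.length == 1 || (PySem.Set.ofList seg).length == 1)
            = ((PySem.Set.ofList seg).length == 1) := by
          have h := bad_cond_eq seg
          rwa [hdt, Bool.true_and, Bool.true_and] at h
        rw [if_pos hs, h2, hdt, Bool.true_and]
  | cons c rest ih =>
      intro seg
      simp only [canPrintGo, splitW]
      by_cases hw : c = 'W'
      · simp only [if_pos hw]
        simp only [List.any_cons, List.reverse_reverse]
        by_cases hs : seg = []
        · subst hs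
          rw [if_neg (fun h => h.1 rfl)]
          have hb0 : (decide (([] : List Char) ≠ []) &&
              ((PySem.Set.ofList ([] : List Char)).length == 1)) = false := rfl
          rw [hb0, Bool.false_or]
          exact ih []
        · have hdt : decide (seg ≠ []) = true := by simp [hs]
          have h2 : (seg.length == 1 || (PySem.Set.ofList seg).length == 1)
              = ((PySem.Set.ofList seg).length == 1) := by
            have h := bad_cond_eq seg
            rwa [hdt, Bool.true_and, Bool.true_and] at h
          cases hb : ((PySem.Set.ofList seg).length == 1) with
          | true =>
              rw [if_pos ⟨hs, by simp⟩, Bool.and_true, hdt, Bool.true_or, if_pos rfl]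
          | false =>
              rw [hb] at h2
              have hcond : ¬(seg ≠ [] ∧ (seg.length == 1 || false) = true) := by
                intro h
                have h3 := h.2
                rw [h2] at h3
                exact Bool.false_ne_true h3
              rw [if_neg hcond, Bool.and_false, Bool.false_or]
              exact ih []
      · simp only [if_neg hw]
        have hr : (seg ++ [c]).reverse = c :: seg.reverse := by simp
        rw [ih (seg ++ [c]), hr]

-- ===== VERDICT (by name: the statement is the Claim_ definition above) =====
theorem can_print_spec : Claim_equal_can_print := by
  intro n s _
  unfold Spec_can_print can_print can_print_alt
  simpa using go_eq s.toList []
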